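-- pv_equiv track=rewrite | github.com/kenbockler/Andmeteaduse_masin-ppe_projekt | PROJEKT/K05/S342/2021-09-29-14-10-37/kodu3.py | moos
-- ===== SOURCE A (Python) =====
-- def moos(a, b, c):
--     x = 0
--     jääk = c - (a * 5)
--     x += a
--     while jääk < 0:
--         jääk += 5
--         x -= 1
--     if jääk > b:
--         return -1
--     else:
--         while jääk != 0:
--             x += 1
--             jääk -= 1
--         return x
-- ===== SOURCE B (Python) =====
-- def moos(a, b, c):
--     j = c - 5 * a
--     if j < 0:
--         a += j // 5
--         j %= 5
--     return -1 if j > b else a + j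
-- ===== Notes on version B (the rewrite author's own statement) =====
-- stated objective: faster
-- what changed: Both while loops are replaced by closed-form floor division/modulo and a direct addition, giving O(1) arithmetic instead of loops proportional to the remainder.
import Mathlib
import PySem

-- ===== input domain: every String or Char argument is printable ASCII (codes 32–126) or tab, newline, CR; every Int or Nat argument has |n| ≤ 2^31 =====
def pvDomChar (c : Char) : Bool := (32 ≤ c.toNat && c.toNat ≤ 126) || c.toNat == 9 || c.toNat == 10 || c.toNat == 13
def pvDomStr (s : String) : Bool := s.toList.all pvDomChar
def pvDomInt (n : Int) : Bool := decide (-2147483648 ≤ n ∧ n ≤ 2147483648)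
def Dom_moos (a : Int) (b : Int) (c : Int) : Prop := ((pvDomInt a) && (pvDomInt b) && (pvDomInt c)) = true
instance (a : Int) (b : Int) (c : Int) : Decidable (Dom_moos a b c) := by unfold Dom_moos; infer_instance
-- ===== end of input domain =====

-- B replaces both counting while-loops by closed-form floor division/modulo (O(1) vs loops proportional to the remainder).

-- ===== PORT A =====
-- first while loop: while jääk < 0: jääk += 5; x -= 1  (state (jääk, x))
def moosLoop1 (j x : Int) : Int × Int :=
  if j < 0 then moosLoop1 (j + 5) (x - 1) else (j, x)
termination_by (-j).toNat
decreasing_by omega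

-- second while loop: while jääk != 0: x += 1; jääk -= 1.  Python loops forever for jääk < 0
-- (unreachable here: jääk ≥ 0 when this loop is entered); the '≤' guard only makes it total.
def moosLoop2 (j x : Int) : Int :=
  if j ≤ 0 then x else moosLoop2 (j - 1) (x + 1)
termination_by j.toNat
decreasing_by omega

def moos (a : Int) (b : Int) (c : Int) : Int :=
  let x : Int := 0
  let j := c - a * 5
  let x := x + a
  let (j, x) := moosLoop1 j x
  if j > b then -1 else moosLoop2 j x

-- ===== PORT B =====
def moos_alt (a : Int) (b : Int) (c : Int) : Int :=
  let j := c - 5 * a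
  let (a, j) := if j < 0 then (a + PySem.Int.floordiv j 5, PySem.Int.mod j 5) else (a, j)
  if j > b then -1 else a + j

-- ===== PRECONDITION & SPEC =====
def Spec_moos (a : Int) (b : Int) (c : Int) (out : Int) : Prop := out = moos_alt a b c
instance (a : Int) (b : Int) (c : Int) (out : Int) : Decidable (Spec_moos a b c out) := by unfold Spec_moos; infer_instance

-- ===== CLAIM (what is proved, stated in full; the proofs are below) =====
def Claim_equal_moos : Prop := ∀ (a : Int) (b : Int) (c : Int), Dom_moos a b c → Spec_moos a b c (moos a b c)

-- ===== LEMMAS AND PROOFS =====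
-- closed form of A's first loop
theorem moosLoop1_eq (j x : Int) :
    moosLoop1 j x =
      if j < 0 then (PySem.Int.mod j 5, x + PySem.Int.floordiv j 5) else (j, x) := by
  induction j, x using moosLoop1.induct with
  | case1 j x hj ih =>
      rw [moosLoop1, if_pos hj, ih]
      have h5 : (0:Int) < 5 := by norm_num
      simp only [PySem.Int.mod_eq_emod_of_pos h5, PySem.Int.floordiv_eq_ediv_of_pos h5]
      by_cases h : j + 5 < 0 <;> simp only [h, hj, if_true, if_false, Prod.mk.injEq] <;>
        refine ⟨by omega, by omega⟩
  | case2 j x hj =>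
      rw [moosLoop1, if_neg hj, if_neg hj]

-- closed form of A's second loop on its reachable inputs (jääk ≥ 0)
theorem moosLoop2_eq (j x : Int) (hj : 0 ≤ j) : moosLoop2 j x = x + j := by
  induction j, x using moosLoop2.induct with
  | case1 j x h => rw [moosLoop2, if_pos h]; omega
  | case2 j x h ih => rw [moosLoop2, if_neg h]; rw [ih (by omega)]; omega

-- ===== VERDICT (by name: the statement is the Claim_ definition above) =====
theorem moos_spec : Claim_equal_moos := by
  intro a b c _
  unfold Spec_moos moos moos_alt
  have h5 : (0:Int) < 5 := by norm_num
  simp only [moosLoop1_eq, PySem.Int.mod_eq_emod_of_pos h5, PySem.Int.floordiv_eq_ediv_of_pos h5]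
  have e1 : c - a * 5 = c - 5 * a := by ring
  rw [e1]
  by_cases h : c - 5 * a < 0
  · simp only [if_pos h]
    by_cases hb : b < (c - 5 * a) % 5
    · simp only [if_pos hb]
    · simp only [if_neg hb,
        moosLoop2_eq ((c - 5 * a) % 5) _ (Int.emod_nonneg _ (by norm_num))]
      omega
  · simp only [if_neg h]
    by_cases hb : b < c - 5 * a
    · simp only [if_pos hb]
    · simp only [if_neg hb, moosLoop2_eq (c - 5 * a) _ (by omega)]
      omega
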